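-- pv_equiv track=rewrite | github.com/shuyangli94/convrec_botplay | critique_utils.py | get_invalid_from_critiques
-- ===== SOURCE A (Python) =====
-- def get_invalid_from_critiques(item_kps: dict, neg: set, pos: set):
--     invalid_items = set()
--     for i in range(len(item_kps)):
--         if i in invalid_items:
--             continue
--         i_kps = set(item_kps[i].keys())
--         # Remove items w negative aspects
--         if any(k in i_kps for k in neg):
--             invalid_items.add(i)
--             continue
--         # Remove items w/o positive aspects
--         if any(k not in i_kps for k in pos):
--             invalid_items.add(i)
--             continue
--     return invalid_items
-- ===== SOURCE B (Python) =====
-- def get_invalid_from_critiques(item_kps: dict, neg: set, pos: set):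
--     n = len(item_kps)
--     # inverted index: aspect -> set of item indices carrying that aspect
--     idx = {}
--     for i in range(n):
--         for aspect in item_kps[i].keys():
--             idx.setdefault(aspect, set()).add(i)
--     neg_invalid = set()
--     for a in neg:
--         neg_invalid |= idx.get(a, set())
--     pos_valid = set(range(n))
--     for a in pos:
--         pos_valid &= idx.get(a, set())
--     return {i for i in range(n) if i in neg_invalid or i not in pos_valid}
-- ===== Notes on version B (the rewrite author's own statement) =====
-- stated objective: alternative
-- what changed: B builds an inverted index aspect->item-indices once, forms neg_invalid as a union of postings and pos_valid as an intersection of postings, then assembles the result in one index scan, instead of A's per-item any-scans over the critique sets.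
import Mathlib
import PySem

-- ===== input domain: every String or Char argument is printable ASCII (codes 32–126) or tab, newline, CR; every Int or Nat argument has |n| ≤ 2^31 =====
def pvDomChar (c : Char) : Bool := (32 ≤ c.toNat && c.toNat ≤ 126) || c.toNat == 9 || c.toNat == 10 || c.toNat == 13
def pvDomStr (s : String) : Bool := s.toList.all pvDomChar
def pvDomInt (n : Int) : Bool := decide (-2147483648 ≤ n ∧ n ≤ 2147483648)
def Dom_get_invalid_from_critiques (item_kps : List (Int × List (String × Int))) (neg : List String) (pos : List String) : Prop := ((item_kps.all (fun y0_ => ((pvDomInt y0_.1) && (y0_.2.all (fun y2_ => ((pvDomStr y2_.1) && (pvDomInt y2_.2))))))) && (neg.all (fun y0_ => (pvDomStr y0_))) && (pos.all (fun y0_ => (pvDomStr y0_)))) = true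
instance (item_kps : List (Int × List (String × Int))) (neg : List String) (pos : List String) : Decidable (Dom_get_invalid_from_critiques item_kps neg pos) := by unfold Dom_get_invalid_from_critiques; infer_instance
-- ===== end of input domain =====

-- B replaces A's per-item scans over neg/pos by an inverted index (aspect -> item indices)
-- combined with set union/intersection; same cost class, different data structure ("alternative").

-- shared helper: keys of item i's aspect dict (item_kps[i].keys(); [] where Python raises KeyError)
def pvKeys (item_kps : List (Int × List (String × Int))) (i : Int) : List String :=
  PySem.Dict.keys (PySem.Dict.mk ((PySem.Dict.mk item_kps).getD i []))

-- ===== PORT A =====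
def get_invalid_from_critiques (item_kps : List (Int × List (String × Int))) (neg : List String) (pos : List String) : List Int :=
  (PySem.List.pyRange 0 (item_kps.length : Int) 1).foldl
    (fun invalid_items i =>
      if PySem.Set.contains invalid_items i then invalid_items
      else
        -- item_kps[i] raises KeyError when i is not a key: excluded by Pre_; getD (inside pvKeys) totalizes
        let i_kps : PySem.Set String := PySem.Set.ofList (pvKeys item_kps i)
        if neg.any (fun k => PySem.Set.contains i_kps k) then
          PySem.Set.add invalid_items i
        else if pos.any (fun k => !(PySem.Set.contains i_kps k)) then
          PySem.Set.add invalid_items i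
        else invalid_items)
    PySem.Set.empty

-- ===== PORT B =====
def get_invalid_from_critiques_alt (item_kps : List (Int × List (String × Int))) (neg : List String) (pos : List String) : List Int :=
  let rng := PySem.List.pyRange 0 (item_kps.length : Int) 1
  let idx : PySem.Dict String (PySem.Set Int) :=
    rng.foldl
      (fun d i =>
        (pvKeys item_kps i).foldl
          (fun d a => d.modify a [] (fun s => PySem.Set.add s i)) d)
      PySem.Dict.empty
  let neg_invalid : PySem.Set Int :=
    neg.foldl (fun s a => PySem.Set.union s (idx.getD a [])) PySem.Set.empty
  let pos_valid : PySem.Set Int :=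
    pos.foldl (fun s a => PySem.Set.inter s (idx.getD a [])) (PySem.Set.ofList rng)
  PySem.Set.ofList (rng.filter
    (fun i => PySem.Set.contains neg_invalid i || !(PySem.Set.contains pos_valid i)))

-- ===== PRECONDITION & SPEC =====
-- Pre_ excludes exactly the inputs where Python's item_kps[i] raises KeyError
-- (some index 0 ≤ i < len(item_kps) is not a key of the dict); B raises there too.
def Pre_get_invalid_from_critiques (item_kps : List (Int × List (String × Int))) (neg : List String) (pos : List String) : Prop :=
  (PySem.List.pyRange 0 (item_kps.length : Int) 1).all
    (fun i => (PySem.Dict.mk item_kps).contains i) = true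
instance (item_kps : List (Int × List (String × Int))) (neg : List String) (pos : List String) : Decidable (Pre_get_invalid_from_critiques item_kps neg pos) := by unfold Pre_get_invalid_from_critiques; infer_instance
def pvWitness_get_invalid_from_critiques : (List (Int × List (String × Int))) × List String × List String :=
  ([(0, [("a", 1)]), (1, [])], (["a"], ["b"]))
def Spec_get_invalid_from_critiques (item_kps : List (Int × List (String × Int))) (neg : List String) (pos : List String) (out : List Int) : Prop := out = get_invalid_from_critiques_alt item_kps neg pos
instance (item_kps : List (Int × List (String × Int))) (neg : List String) (pos : List String) (out : List Int) : Decidable (Spec_get_invalid_from_critiques item_kps neg pos out) := by unfold Spec_get_invalid_from_critiques; infer_instance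

-- ===== CLAIM (what is proved, stated in full; the proofs are below) =====
def Claim_equal_get_invalid_from_critiques : Prop := ∀ (item_kps : List (Int × List (String × Int))) (neg : List String) (pos : List String), Dom_get_invalid_from_critiques item_kps neg pos → Pre_get_invalid_from_critiques item_kps neg pos → Spec_get_invalid_from_critiques item_kps neg pos (get_invalid_from_critiques item_kps neg pos)

-- ===== LEMMAS AND PROOFS =====

-- A's fold is a filter of the range (generalized over the two Boolean tests)
theorem pvFoldA (g1 g2 : Int → Bool) :
    ∀ (l acc : List Int), l.Nodup → (∀ i ∈ l, i ∉ acc) →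
      l.foldl (fun s i =>
        if PySem.Set.contains s i then s
        else if g1 i then PySem.Set.add s i
        else if g2 i then PySem.Set.add s i
        else s) acc
      = acc ++ l.filter (fun i => g1 i || g2 i) := by
  intro l
  induction l with
  | nil => intro acc _ _; simp
  | cons i l ih =>
    intro acc hnd hdis
    have hi : i ∉ acc := hdis i (by simp)
    have hc : PySem.Set.contains acc i = false := by
      cases hcc : PySem.Set.contains acc i
      · rfl
      · exact absurd ((PySem.Set.contains_iff acc i).mp hcc) hi
    have hnd' : l.Nodup := (List.nodup_cons.mp hnd).2
    have hni : i ∉ l := (List.nodup_cons.mp hnd).1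
    have hacc' : ∀ j ∈ l, j ∉ acc ++ [i] := by
      intro j hj hmem
      rcases List.mem_append.mp hmem with h | h
      · exact hdis j (List.mem_cons_of_mem _ hj) h
      · exact hni (by rwa [List.mem_singleton.mp h] at hj)
    have hstep : (if PySem.Set.contains acc i = true then acc
        else if g1 i = true then PySem.Set.add acc i
        else if g2 i = true then PySem.Set.add acc i else acc)
        = if (g1 i || g2 i) = true then acc ++ [i] else acc := by
      rw [hc]
      by_cases h1 : g1 i = true <;> by_cases h2 : g2 i = true <;>
        simp [h1, h2, PySem.Set.add_of_not_mem hi]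
    simp only [List.foldl_cons]
    rw [hstep]
    by_cases hg : (g1 i || g2 i) = true
    · rw [if_pos hg, ih _ hnd' hacc']
      simp [hg]
    · rw [if_neg hg, ih acc hnd' (fun j hj => hdis j (List.mem_cons_of_mem _ hj))]
      simp [hg]

-- inner index-building loop: membership in a posting list
theorem pvInner (i : Int) :
    ∀ (ks : List String) (d : PySem.Dict String (PySem.Set Int)) (a : String) (j : Int),
      j ∈ (ks.foldl (fun d a => d.modify a [] (fun s => PySem.Set.add s i)) d).getD a []
        ↔ j ∈ d.getD a [] ∨ (a ∈ ks ∧ j = i) := by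
  intro ks
  induction ks with
  | nil => intro d a j; simp
  | cons k ks ih =>
    intro d a j
    simp only [List.foldl_cons, ih]
    rw [PySem.Dict.getD_modify]
    by_cases h : a = k
    · subst h; simp [PySem.Set.mem_add]; tauto
    · simp [h]
      try tauto

-- outer index-building loop
theorem pvIdx (item_kps : List (Int × List (String × Int))) :
    ∀ (l : List Int) (d : PySem.Dict String (PySem.Set Int)) (a : String) (j : Int),
      j ∈ (l.foldl (fun d i => (pvKeys item_kps i).foldl
            (fun d a => d.modify a [] (fun s => PySem.Set.add s i)) d) d).getD a []
        ↔ j ∈ d.getD a [] ∨ ∃ i ∈ l, a ∈ pvKeys item_kps i ∧ j = i := by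
  intro l
  induction l with
  | nil => intro d a j; simp
  | cons i l ih =>
    intro d a j
    simp only [List.foldl_cons, ih, pvInner]
    simp only [List.mem_cons]
    constructor
    · rintro (⟨h | ⟨hk, hj⟩⟩ | ⟨i', hi', hk, hj⟩)
      · exact Or.inl h
      · exact Or.inr ⟨i, Or.inl rfl, hk, hj⟩
      · exact Or.inr ⟨i', Or.inr hi', hk, hj⟩
    · rintro (h | ⟨i', hi' | hi', hk, hj⟩)
      · exact Or.inl (Or.inl h)
      · exact Or.inl (Or.inr ⟨hi' ▸ hk, hj ▸ (hi' ▸ rfl)⟩)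
      · exact Or.inr ⟨i', hi', hk, hj⟩

-- union accumulation
theorem pvUnion (g : String → List Int) (j : Int) :
    ∀ (l : List String) (s : PySem.Set Int),
      j ∈ l.foldl (fun s a => PySem.Set.union s (g a)) s ↔ j ∈ s ∨ ∃ a ∈ l, j ∈ g a := by
  intro l
  induction l with
  | nil => intro s; simp
  | cons a l ih =>
    intro s
    simp only [List.foldl_cons, ih, PySem.Set.mem_union, List.mem_cons]
    constructor
    · rintro ((h | h) | ⟨a', ha', h⟩)
      · exact Or.inl h
      · exact Or.inr ⟨a, Or.inl rfl, h⟩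
      · exact Or.inr ⟨a', Or.inr ha', h⟩
    · rintro (h | ⟨a', ha' | ha', h⟩)
      · exact Or.inl (Or.inl h)
      · exact Or.inl (Or.inr (ha' ▸ h))
      · exact Or.inr ⟨a', ha', h⟩

-- intersection accumulation
theorem pvInter (g : String → List Int) (j : Int) :
    ∀ (l : List String) (s : PySem.Set Int),
      j ∈ l.foldl (fun s a => PySem.Set.inter s (g a)) s ↔ j ∈ s ∧ ∀ a ∈ l, j ∈ g a := by
  intro l
  induction l with
  | nil => intro s; simp
  | cons a l ih =>
    intro s
    simp only [List.foldl_cons, ih, PySem.Set.mem_inter, List.mem_cons]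
    constructor
    · rintro ⟨⟨hs, ha⟩, hall⟩
      exact ⟨hs, fun a' ha' => ha'.elim (fun h => h ▸ ha) (hall a')⟩
    · rintro ⟨hs, hall⟩
      exact ⟨⟨hs, hall a (Or.inl rfl)⟩, fun a' ha' => hall a' (Or.inr ha')⟩

-- ===== VERDICT (by name: the statement is the Claim_ definition above) =====
theorem get_invalid_from_critiques_spec : Claim_equal_get_invalid_from_critiques := by
  intro item_kps neg pos _ _
  unfold Spec_get_invalid_from_critiques
  simp only [get_invalid_from_critiques, get_invalid_from_critiques_alt]
  have hnd : (PySem.List.pyRange 0 (item_kps.length : Int) 1).Nodup :=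
    PySem.List.nodup_pyRange_one 0 (item_kps.length : Int)
  rw [pvFoldA _ _ _ PySem.Set.empty hnd (by intro i _; simp [PySem.Set.empty])]
  refine Eq.trans ?_ (PySem.Set.ofList_eq_self_of_nodup _ (List.Nodup.filter _ hnd)).symm
  show [] ++ _ = _
  rw [List.nil_append]
  apply List.filter_congr
  intro i hi
  have hmem : ∀ (j : Int) (a : String),
      (j ∈ ((PySem.List.pyRange 0 (item_kps.length : Int) 1).foldl
            (fun d i => (pvKeys item_kps i).foldl
              (fun d a => d.modify a [] (fun s => PySem.Set.add s i)) d)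
            PySem.Dict.empty).getD a [])
        ↔ ∃ i' ∈ PySem.List.pyRange 0 (item_kps.length : Int) 1, a ∈ pvKeys item_kps i' ∧ j = i' := by
    intro j a
    rw [pvIdx]
    simp
  rw [Bool.eq_iff_iff]
  simp only [Bool.or_eq_true, List.any_eq_true, PySem.Set.contains_iff, PySem.Set.mem_ofList,
    Bool.not_eq_true', ← Bool.not_eq_true, PySem.Set.contains_iff, pvUnion, pvInter,
    PySem.Set.mem_ofList, hmem, PySem.Set.empty, List.not_mem_nil, false_or]
  constructor
  · rintro (⟨a, ha, hk⟩ | ⟨a, ha, hk⟩)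
    · exact Or.inl ⟨a, ha, i, hi, hk, rfl⟩
    · refine Or.inr ?_
      rintro ⟨_, hall⟩
      obtain ⟨i', hi', hk', hj⟩ := hall a ha
      exact hk (by rw [hj]; exact hk')
  · rintro (⟨a, ha, i', hi', hk, hj⟩ | h)
    · exact Or.inl ⟨a, ha, by rw [hj]; exact hk⟩
    · by_cases hne : ∃ a ∈ neg, a ∈ pvKeys item_kps i
      · obtain ⟨a, ha, hk⟩ := hne; exact Or.inl ⟨a, ha, hk⟩
      · refine Or.inr ?_
        by_contra hcon
        push Not at hcon
        exact h ⟨hi, fun a ha => ⟨i, hi, hcon a ha, rfl⟩⟩
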